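-- pv_equiv track=rewrite | github.com/gjwei/algorithms | written_exam/tencent/gcd.py | solution
-- ===== SOURCE A (Python) =====
-- from functools import reduce
-- from math import gcd
--
-- def lcm(a, b):
--     return a * b // gcd(a, b)
--
-- def lcm_seq(seq):
--     return reduce(lcm, seq)
--
-- def solution(n):
--     m = n + 1
--     l1 = lcm_seq(list(range(1, m + 1)))
--     l2 = m
--
--     while l1 != l2:
--         m += 1
--         l1 = lcm(l1, m)
--         l2 = lcm(l2, m)
--
--     return m
-- ===== SOURCE B (Python) =====
-- def solution(n):
--     # lcm(1..m) == lcm(n+1..m) holds exactly when, for every prime p <= n with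
--     # maximal power q = p^k <= n, some multiple of q lies in (n, m]; the smallest
--     # such multiple is q*(n//q + 1).  So the answer is the max of those values
--     # (and at least n+1), computed with small integers instead of huge lcms.
--     ans = n + 1
--     for p in range(2, n + 1):
--         d = 2
--         while d * d <= p:
--             if p % d == 0:
--                 break
--             d += 1
--         else:
--             q = p
--             while q * p <= n:
--                 q *= p
--             c = q * (n // q + 1)
--             if c > ans:
--                 ans = c
--     return ans
-- ===== Notes on version B (the rewrite author's own statement) =====
-- stated objective: faster
-- what changed: Instead of growing two exponentially large lcm accumulators until lcm(1..m) == lcm(n+1..m), B uses the number-theoretic characterization of that equality and returns max(n+1, max over primes p <= n of q*(n//q+1)) where q is the largest power of p not exceeding n, computed with small integers and trial-division primality.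
import Mathlib
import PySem

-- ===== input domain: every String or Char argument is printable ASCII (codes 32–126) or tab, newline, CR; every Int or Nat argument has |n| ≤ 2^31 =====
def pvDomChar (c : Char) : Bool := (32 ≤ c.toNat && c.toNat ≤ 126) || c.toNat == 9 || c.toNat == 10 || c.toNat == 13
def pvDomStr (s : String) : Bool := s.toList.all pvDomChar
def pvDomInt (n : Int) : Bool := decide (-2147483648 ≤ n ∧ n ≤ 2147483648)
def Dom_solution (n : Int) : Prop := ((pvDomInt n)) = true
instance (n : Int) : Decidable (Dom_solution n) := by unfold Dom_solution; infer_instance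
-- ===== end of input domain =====

-- B replaces A's loop over exponentially large lcm accumulators by the closed form
-- max(n+1, max over primes p ≤ n of q*(n//q+1)) with q the largest power of p ≤ n.

-- ===== PORT A =====
-- lcm(a, b) = a * b // gcd(a, b)
def pyLcm (a b : Int) : Int := PySem.Int.floordiv (a * b) (Int.gcd a b)

-- lcm_seq(seq) = reduce(lcm, seq); Python's reduce raises TypeError on an empty
-- sequence (that happens exactly when n < 0, excluded by Pre_); [] ↦ 0 is junk.
def lcmSeq : List Int → Int
  | [] => 0
  | h :: t => t.foldl pyLcm h

-- the while loop; fuel is a totality guard only (n.toNat + 1 iterations always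
-- suffice because the loop stops at m ≤ 2n, which the proofs below establish)
def loopA : Nat → Int → Int → Int → Int
  | 0, m, _, _ => m
  | fuel + 1, m, l1, l2 =>
    if l1 ≠ l2 then loopA fuel (m + 1) (pyLcm l1 (m + 1)) (pyLcm l2 (m + 1)) else m

def solution (n : Int) : Int :=
  let m := n + 1
  let l1 := lcmSeq (PySem.List.pyRange 1 (m + 1) 1)
  let l2 := m
  loopA (n.toNat + 1) m l1 l2

-- ===== PORT B =====
-- inner `while d * d <= p: if p % d == 0: break; d += 1` (true iff no divisor found);
-- fuel p.toNat is a totality guard only: the loop runs at most sqrt(p) ≤ p times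
def trialF (p : Int) : Nat → Int → Bool
  | 0, _ => true
  | fuel + 1, d =>
    if d * d ≤ p then (if PySem.Int.mod p d = 0 then false else trialF p fuel (d + 1))
    else true

-- inner `while q * p <= n: q *= p`; fuel n.toNat is a totality guard only
-- (the loop runs at most log2 n times)
def powLoopF (n p : Int) : Nat → Int → Int
  | 0, q => q
  | fuel + 1, q => if q * p ≤ n then powLoopF n p fuel (q * p) else q

def solution_alt (n : Int) : Int :=
  (PySem.List.pyRange 2 (n + 1) 1).foldl
    (fun ans p =>
      if trialF p p.toNat 2 then
        let q := powLoopF n p n.toNat p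
        let c := q * (PySem.Int.floordiv n q + 1)
        if ans < c then c else ans
      else ans)
    (n + 1)

-- ===== PRECONDITION & SPEC =====
-- A raises TypeError (reduce() of an empty sequence) for n < 0; otherwise total.
def Pre_solution (n : Int) : Prop := 0 ≤ n
instance (n : Int) : Decidable (Pre_solution n) := by unfold Pre_solution; infer_instance
def pvWitness_solution : Int := (5)

def Spec_solution (n : Int) (out : Int) : Prop := out = solution_alt n
instance (n : Int) (out : Int) : Decidable (Spec_solution n out) := by unfold Spec_solution; infer_instance

-- ===== CLAIM (what is proved, stated in full; the proofs are below) =====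
def Claim_equal_solution : Prop := ∀ (n : Int), Dom_solution n → Pre_solution n → Spec_solution n (solution n)

-- ===== LEMMAS AND PROOFS =====

-- lcm over Finset.Icc a b: the mathematical object both ports compute with
def LN (a b : Nat) : Nat := (Finset.Icc a b).lcm id

-- largest power of p not exceeding N, and the smallest multiple of it above N
def qv (p N : Nat) : Nat := p ^ Nat.log p N
def cv (p N : Nat) : Nat := qv p N * (N / qv p N + 1)

-- the condition characterizing lcm(1..m) = lcm(N+1..m) for m ≥ N+1
def condN (N m : Nat) : Prop := ∀ p : Nat, p.Prime → p ≤ N → cv p N ≤ m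

-- reference value of B's fold after processing candidates 2..t
def bref (N : Nat) : Nat → Nat
  | 0 => N + 1
  | t + 1 => if Nat.Prime (t + 1) then max (bref N t) (cv (t + 1) N) else bref N t

lemma LN_ne_zero {a b : Nat} (ha : 1 ≤ a) : LN a b ≠ 0 := by
  unfold LN
  rw [Ne, Finset.lcm_eq_zero_iff]
  rintro ⟨x, hx, hx0⟩
  simp at hx0
  subst hx0
  simp at hx
  omega

lemma LN_succ {a b : Nat} (h : a ≤ b + 1) : LN a (b + 1) = Nat.lcm (LN a b) (b + 1) := by
  unfold LN
  rw [show Finset.Icc a (b + 1) = insert (b + 1) (Finset.Icc a b) by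
        ext x; simp [Finset.mem_Icc, Finset.mem_insert]; omega]
  rw [Finset.lcm_insert, lcm_eq_nat_lcm, Nat.lcm_comm]
  rfl

lemma LN_self (a : Nat) : LN a a = a := by
  unfold LN
  rw [Finset.Icc_self, Finset.lcm_singleton, normalize_eq]
  rfl

lemma dvd_LN {a b j : Nat} (h : j ∈ Finset.Icc a b) : j ∣ LN a b := Finset.dvd_lcm h

lemma LN_dvd {a b X : Nat} (h : ∀ j ∈ Finset.Icc a b, j ∣ X) : LN a b ∣ X := Finset.lcm_dvd h

-- a prime power dividing a lcm divides one of the two sides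
lemma pow_dvd_lcm_split {p e x y : Nat} (hp : p.Prime) (h : p ^ e ∣ Nat.lcm x y) :
    p ^ e ∣ x ∨ p ^ e ∣ y := by
  rcases Nat.eq_zero_or_pos x with hx | hx
  · exact Or.inl (hx ▸ dvd_zero _)
  rcases Nat.eq_zero_or_pos y with hy | hy
  · exact Or.inr (hy ▸ dvd_zero _)
  have hx0 : x ≠ 0 := hx.ne'
  have hy0 : y ≠ 0 := hy.ne'
  have hl0 : Nat.lcm x y ≠ 0 := Nat.lcm_ne_zero hx0 hy0
  rw [hp.pow_dvd_iff_le_factorization hl0, Nat.factorization_lcm hx0 hy0] at h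
  simp [Finsupp.sup_apply] at h
  rcases h with h' | h'
  · exact Or.inl ((hp.pow_dvd_iff_le_factorization hx0).mpr h')
  · exact Or.inr ((hp.pow_dvd_iff_le_factorization hy0).mpr h')

lemma pow_dvd_LN_exists {p e a b : Nat} (hp : p.Prime) (hab : a ≤ b) (h : p ^ e ∣ LN a b) :
    ∃ j ∈ Finset.Icc a b, p ^ e ∣ j := by
  induction b with
  | zero =>
    exact ⟨0, by simp; omega, dvd_zero _⟩
  | succ b ih =>
    by_cases hab' : a ≤ b
    · rw [LN_succ (by omega)] at h
      rcases pow_dvd_lcm_split hp h with h' | h'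
      · rcases ih hab' h' with ⟨j, hj, hdvd⟩
        exact ⟨j, by simp [Finset.mem_Icc] at hj ⊢; omega, hdvd⟩
      · exact ⟨b + 1, by simp [Finset.mem_Icc]; omega, h'⟩
    · have : a = b + 1 := by omega
      subst this
      rw [LN_self] at h
      exact ⟨b + 1, by simp, h⟩

-- divisibility into a lcm via prime powers
lemma dvd_of_prime_pow_dvd {j X : Nat} (hj : j ≠ 0) (hX : X ≠ 0)
    (h : ∀ p : Nat, p.Prime → p ^ j.factorization p ∣ X) : j ∣ X := by
  rw [← Nat.factorization_le_iff_dvd hj hX, Finsupp.le_def]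
  intro p
  by_cases hp : p.Prime
  · exact (hp.pow_dvd_iff_le_factorization hX).mp (h p hp)
  · simp [Nat.factorization_eq_zero_of_not_prime _ hp]

lemma qv_le {p N : Nat} (hp : 2 ≤ p) (hpN : p ≤ N) : qv p N ≤ N :=
  Nat.pow_log_le_self p (by omega)

lemma qv_pos {p N : Nat} (hp : 2 ≤ p) : 0 < qv p N := pow_pos (by omega : 0 < p) _

lemma cv_le_two_mul {p N : Nat} (hp : 2 ≤ p) (hpN : p ≤ N) : cv p N ≤ 2 * N := by
  have h1 : qv p N * (N / qv p N) ≤ N := Nat.mul_div_le N (qv p N)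
  have h2 : qv p N ≤ N := qv_le hp hpN
  calc cv p N = qv p N * (N / qv p N) + qv p N := by unfold cv; ring
    _ ≤ N + N := by omega
    _ = 2 * N := by omega

lemma lt_cv {p N : Nat} (hp : 2 ≤ p) : N < cv p N := by
  have hq : 0 < qv p N := qv_pos hp
  have h1 : N % qv p N < qv p N := Nat.mod_lt _ hq
  have h2 : qv p N * (N / qv p N) + N % qv p N = N := Nat.div_add_mod N (qv p N)
  have h3 : qv p N * (N / qv p N + 1) = qv p N * (N / qv p N) + qv p N := by ring
  unfold cv
  omega

-- MAIN characterization: for m ≥ N+1, lcm(1..m) = lcm(N+1..m) ↔ condN N m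
lemma main_iff {N m : Nat} (h : N + 1 ≤ m) : LN 1 m = LN (N + 1) m ↔ condN N m := by
  constructor
  · intro heq p hp hpN
    have hp2 : 2 ≤ p := hp.two_le
    have hm0 : m ≠ 0 := by omega
    set K := Nat.log p m with hK
    have hQle : p ^ K ≤ m := Nat.pow_log_le_self p hm0
    have hQmem : p ^ K ∈ Finset.Icc 1 m := by
      simp [Finset.mem_Icc]
      exact ⟨pow_pos (by omega : 0 < p) _, hQle⟩
    have hQdvd : p ^ K ∣ LN (N + 1) m := heq ▸ dvd_LN hQmem
    obtain ⟨j, hjmem, hjdvd⟩ := pow_dvd_LN_exists hp h hQdvd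
    simp [Finset.mem_Icc] at hjmem
    have hlog : Nat.log p N ≤ K := Nat.log_mono_right (by omega)
    have hqdvd : qv p N ∣ j := (pow_dvd_pow p hlog).trans hjdvd
    obtain ⟨t, ht⟩ := hqdvd
    have hq : 0 < qv p N := qv_pos hp2
    have hNt : N / qv p N < t := by
      rw [Nat.div_lt_iff_lt_mul hq]
      calc N < j := by omega
        _ = t * qv p N := by rw [ht]; ring
    calc cv p N = qv p N * (N / qv p N + 1) := rfl
      _ ≤ qv p N * t := by have := hNt; exact Nat.mul_le_mul_left _ (by omega)
      _ = j := ht.symm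
      _ ≤ m := hjmem.2
  · intro hc
    apply Nat.dvd_antisymm
    · -- lcm(1..m) ∣ lcm(N+1..m)
      apply LN_dvd
      intro j hj
      simp [Finset.mem_Icc] at hj
      have hj0 : j ≠ 0 := by omega
      have hX0 : LN (N + 1) m ≠ 0 := LN_ne_zero (by omega)
      apply dvd_of_prime_pow_dvd hj0 hX0
      intro p hp
      set e := j.factorization p with he
      rcases Nat.eq_zero_or_pos e with he0 | he1
      · simp [he0]
      have hp2 : 2 ≤ p := hp.two_le
      have hpe_dvd_j : p ^ e ∣ j := Nat.ordProj_dvd j p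
      have hpe_le : p ^ e ≤ j := Nat.le_of_dvd (by omega) hpe_dvd_j
      by_cases hcase : p ^ e ≤ N
      · -- p^e ≤ N: use the guaranteed multiple cv p N of qv p N
        have hpN : p ≤ N := by
          calc p = p ^ 1 := (pow_one p).symm
            _ ≤ p ^ e := Nat.pow_le_pow_right (by omega) he1
            _ ≤ N := hcase
        have hN0 : N ≠ 0 := by omega
        have helog : e ≤ Nat.log p N :=
          (Nat.le_log_iff_pow_le (by omega) hN0).mpr hcase
        have h1 : p ^ e ∣ qv p N := pow_dvd_pow p helog
        have h2 : qv p N ∣ cv p N := Dvd.intro _ rfl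
        have h3 : cv p N ∣ LN (N + 1) m := by
          apply dvd_LN
          simp [Finset.mem_Icc]
          exact ⟨lt_cv hp2, hc p hp hpN⟩
        exact (h1.trans h2).trans h3
      · -- p^e > N: p^e itself lies in (N, m]
        apply dvd_LN
        simp [Finset.mem_Icc]
        omega
    · -- lcm(N+1..m) ∣ lcm(1..m)
      apply LN_dvd
      intro j hj
      apply dvd_LN
      simp [Finset.mem_Icc] at hj ⊢
      omega

-- properties of B's reference value
lemma bref_ge (N t : Nat) : N + 1 ≤ bref N t := by
  induction t with
  | zero => simp [bref]
  | succ t ih => simp only [bref]; split_ifs <;> omega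

lemma bref_mono_le {N t p : Nat} (hp : p.Prime) (hpt : p ≤ t) : cv p N ≤ bref N t := by
  induction t with
  | zero => have := hp.two_le; omega
  | succ t ih =>
    simp only [bref]
    by_cases h : p = t + 1
    · subst h; rw [if_pos hp]; omega
    · have := ih (by omega)
      split_ifs <;> omega

lemma bref_cases (N t : Nat) :
    bref N t = N + 1 ∨ ∃ p : Nat, p.Prime ∧ p ≤ t ∧ bref N t = cv p N := by
  induction t with
  | zero => exact Or.inl rfl
  | succ t ih =>
    simp only [bref]
    by_cases h : Nat.Prime (t + 1)
    · rw [if_pos h]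
      rcases Nat.le_total (bref N t) (cv (t + 1) N) with hle | hle
      · right; exact ⟨t + 1, h, le_refl _, by omega⟩
      · rcases ih with h' | ⟨p, hp, hpt, h'⟩
        · left; omega
        · right; exact ⟨p, hp, by omega, by omega⟩
    · rw [if_neg h]
      rcases ih with h' | ⟨p, hp, hpt, h'⟩
      · left; exact h'
      · right; exact ⟨p, hp, by omega, h'⟩

-- ===== bridges from the ports to the Nat-level objects =====

lemma pyLcm_cast (x y : Nat) : pyLcm (x : Int) (y : Int) = (Nat.lcm x y : Int) := by
  unfold pyLcm
  rw [Int.gcd_natCast_natCast]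
  rw [show ((x : Int) * (y : Int)) = ((x * y : Nat) : Int) by push_cast; ring]
  rw [PySem.Int.floordiv_natCast]
  rfl

lemma lcmSeq_append {l : List Int} {h x : Int} :
    lcmSeq ((h :: l) ++ [x]) = pyLcm (lcmSeq (h :: l)) x := by
  simp [lcmSeq, List.foldl_append]

lemma lcmSeq_cast {m : Nat} (hm : 1 ≤ m) :
    lcmSeq (PySem.List.pyRange 1 ((m : Int) + 1) 1) = (LN 1 m : Int) := by
  induction m with
  | zero => omega
  | succ m ih =>
    by_cases hm1 : 1 ≤ m
    · rw [show ((m + 1 : Nat) : Int) + 1 = ((m : Int) + 1) + 1 by push_cast; ring,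
        PySem.List.pyRange_one_succ_right (by omega)]
      have hne : PySem.List.pyRange 1 ((m : Int) + 1) 1 ≠ [] := by
        rw [PySem.List.pyRange_one_cons (by omega)]
        simp
      obtain ⟨h, l, hl⟩ : ∃ h l, PySem.List.pyRange 1 ((m : Int) + 1) 1 = h :: l := by
        cases hE : PySem.List.pyRange 1 ((m : Int) + 1) 1 with
        | nil => exact absurd hE hne
        | cons h l => exact ⟨h, l, rfl⟩
      rw [hl, lcmSeq_append, ← hl, ih hm1,
        show ((m : Int) + 1) = ((m + 1 : Nat) : Int) by push_cast; ring,
        pyLcm_cast, LN_succ (by omega)]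
    · have : m = 0 := by omega
      subst this
      norm_num
      rw [show (2 : Int) = 1 + 1 by norm_num, PySem.List.pyRange_one_succ_right (by norm_num)]
      rw [PySem.List.pyRange_one_eq_nil (by norm_num)]
      simp [lcmSeq, LN_self]

lemma trialF_iff {k d fuel : Nat} (hd : 2 ≤ d) (hfuel : k + 2 ≤ fuel + d) :
    trialF (k : Int) fuel (d : Int) = true ↔ ∀ e : Nat, d ≤ e → e * e ≤ k → ¬ e ∣ k := by
  induction fuel generalizing d with
  | zero =>
    simp only [trialF, true_iff]
    intro e hde hek
    have h2 : e ≤ e * e := Nat.le_mul_of_pos_left e (by omega)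
    omega
  | succ fuel ih =>
    simp only [trialF]
    by_cases hdk : d * d ≤ k
    · rw [if_pos (by exact_mod_cast hdk)]
      by_cases hmod : d ∣ k
      · rw [if_pos]
        · simp only [Bool.false_eq_true, false_iff]
          push Not
          exact ⟨d, le_refl d, hdk, hmod⟩
        · rw [PySem.Int.mod_eq_zero_iff_dvd]
          exact_mod_cast hmod
      · rw [if_neg]
        · rw [show ((d : Int) + 1) = ((d + 1 : Nat) : Int) by push_cast; ring]
          rw [ih (by omega) (by omega)]
          constructor
          · intro h e hde hek
            rcases Nat.eq_or_lt_of_le hde with h' | h'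
            · subst h'; exact hmod
            · exact h e h' hek
          · intro h e hde hek
            exact h e (by omega) hek
        · rw [PySem.Int.mod_eq_zero_iff_dvd]
          intro hc
          exact hmod (by exact_mod_cast hc)
    · rw [if_neg (by exact_mod_cast hdk)]
      simp only [true_iff]
      intro e hde hek
      have : d * d ≤ e * e := Nat.mul_le_mul hde hde
      omega

lemma trialF_prime_iff {k : Nat} (hk : 2 ≤ k) :
    trialF (k : Int) k 2 = true ↔ k.Prime := by
  rw [show ((2 : Int)) = ((2 : Nat) : Int) by norm_num]
  rw [trialF_iff (le_refl 2) (by omega)]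
  rw [Nat.prime_def_le_sqrt]
  constructor
  · intro h
    exact ⟨hk, fun m hm hms => h m hm (Nat.le_sqrt.mp hms)⟩
  · rintro ⟨-, h⟩ e he2 hek
    exact h e he2 (Nat.le_sqrt.mpr hek)

lemma powLoopF_eq {N p i fuel : Nat} (hp : 2 ≤ p) (hi : p ^ i ≤ N)
    (hfuel : Nat.log p N ≤ fuel + i) :
    powLoopF (N : Int) (p : Int) fuel ((p ^ i : Nat) : Int) = ((qv p N : Nat) : Int) := by
  have hN0 : N ≠ 0 := by
    intro h; subst h; simp at hi; omega
  have hilog : i ≤ Nat.log p N := (Nat.le_log_iff_pow_le (by omega) hN0).mpr hi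
  induction fuel generalizing i with
  | zero =>
    have : i = Nat.log p N := by omega
    subst this
    simp [powLoopF, qv]
  | succ fuel ih =>
    simp only [powLoopF]
    by_cases hstep : p ^ (i + 1) ≤ N
    · rw [if_pos]
      · rw [show ((p ^ i : Nat) : Int) * (p : Int) = ((p ^ (i + 1) : Nat) : Int) by push_cast; ring]
        exact ih hstep (by omega) ((Nat.le_log_iff_pow_le (by omega) hN0).mpr hstep)
      · rw [show ((p ^ i : Nat) : Int) * (p : Int) = ((p ^ (i + 1) : Nat) : Int) by push_cast; ring]
        exact_mod_cast hstep
    · have : i = Nat.log p N := by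
        have h2 : ¬ (i + 1 ≤ Nat.log p N) := by
          intro hc
          exact hstep ((Nat.le_log_iff_pow_le (by omega) hN0).mp hc)
        omega
      subst this
      rw [if_neg]
      · simp [qv]
      · rw [show ((p ^ Nat.log p N : Nat) : Int) * (p : Int) = ((p ^ (Nat.log p N + 1) : Nat) : Int) by push_cast; ring]
        exact_mod_cast hstep

lemma foldB_eq (N : Nat) : ∀ t : Nat, t ≤ N →
    (PySem.List.pyRange 2 ((t : Int) + 1) 1).foldl
      (fun ans p =>
        if trialF p p.toNat 2 then
          let q := powLoopF (N : Int) p ((N : Int)).toNat p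
          let c := q * (PySem.Int.floordiv (N : Int) q + 1)
          if ans < c then c else ans
        else ans)
      ((N : Int) + 1) = (bref N t : Int) := by
  intro t
  induction t with
  | zero =>
    intro _
    rw [PySem.List.pyRange_one_eq_nil (by norm_num)]
    simp [bref]
  | succ t ih =>
    intro htN
    by_cases ht1 : 1 ≤ t
    case neg =>
      have : t = 0 := by omega
      subst this
      rw [show ((1 : Nat) : Int) + 1 = (2 : Int) by norm_num,
        PySem.List.pyRange_one_eq_nil (by norm_num)]
      simp [bref, Nat.not_prime_one]
    case pos =>
      rw [show ((t + 1 : Nat) : Int) + 1 = ((t : Int) + 1) + 1 by push_cast; ring,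
        PySem.List.pyRange_one_succ_right (by omega), List.foldl_append, ih (by omega)]
      -- one step of the fold at p = t + 1
      simp only [List.foldl]
      rw [show ((t : Int) + 1) = ((t + 1 : Nat) : Int) by push_cast; ring]
      have hk2 : 2 ≤ t + 1 := by omega
      rw [show (((t + 1 : Nat) : Int)).toNat = t + 1 by simp]
      by_cases hprime : Nat.Prime (t + 1)
      · rw [if_pos ((trialF_prime_iff hk2).mpr hprime)]
        have hq : powLoopF (N : Int) ((t + 1 : Nat) : Int) ((N : Int)).toNat ((t + 1 : Nat) : Int)
            = ((qv (t + 1) N : Nat) : Int) := by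
          have := powLoopF_eq (N := N) (p := t + 1) (i := 1) (fuel := N) hk2
            (by simpa using htN) (by have := Nat.log_le_self (t + 1) N; omega)
          simpa using this
        rw [show ((N : Int)).toNat = N by simp] at hq ⊢
        rw [hq, PySem.Int.floordiv_natCast]
        rw [show ((qv (t + 1) N : Nat) : Int) * (((N / qv (t + 1) N : Nat) : Int) + 1)
            = ((cv (t + 1) N : Nat) : Int) by unfold cv; push_cast; ring]
        simp only [bref, if_pos hprime]
        split_ifs with hlt
        · have : bref N t ≤ cv (t + 1) N := by exact_mod_cast hlt.le
          push_cast
          omega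
        · have : cv (t + 1) N ≤ bref N t := by
            have := not_lt.mp hlt
            exact_mod_cast this
          push_cast
          omega
      · rw [if_neg (by rw [trialF_prime_iff hk2]; exact hprime)]
        simp only [bref, if_neg hprime]

lemma loopA_eq {N M : Nat} (hPM : LN 1 M = LN (N + 1) M)
    (hmin : ∀ m : Nat, N + 1 ≤ m → m < M → LN 1 m ≠ LN (N + 1) m) :
    ∀ fuel m : Nat, N + 1 ≤ m → m ≤ M → M ≤ m + fuel →
      loopA fuel (m : Int) ((LN 1 m : Nat) : Int) ((LN (N + 1) m : Nat) : Int) = (M : Int) := by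
  intro fuel
  induction fuel with
  | zero =>
    intro m h1 h2 h3
    have : m = M := by omega
    subst this
    rfl
  | succ fuel ih =>
    intro m h1 h2 h3
    simp only [loopA]
    rcases Nat.eq_or_lt_of_le h2 with heq | hlt
    · subst heq
      rw [if_neg (by rw [hPM]; simp)]
    · rw [if_pos (by
        have := hmin m h1 hlt
        simp only [ne_eq, Nat.cast_inj]
        exact this)]
      rw [show ((m : Int) + 1) = ((m + 1 : Nat) : Int) by push_cast; ring,
        pyLcm_cast, pyLcm_cast, ← LN_succ (by omega), ← LN_succ (by omega)]
      exact ih (m + 1) (by omega) (by omega) (by omega)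

-- ===== VERDICT (by name: the statement is the Claim_ definition above) =====
theorem solution_spec : Claim_equal_solution := by
  intro n _ hpre
  unfold Spec_solution
  have hN : n = ((n.toNat : Nat) : Int) := (Int.toNat_of_nonneg hpre).symm
  set N := n.toNat with hNdef
  -- B's value
  have hB : solution_alt n = (bref N N : Int) := by
    unfold solution_alt
    rw [hN]
    exact foldB_eq N N (le_refl N)
  -- A's value
  set M := bref N N with hM
  have hM1 : N + 1 ≤ M := bref_ge N N
  have hcond : condN N M := fun p hp hpN => bref_mono_le hp hpN
  have hPM : LN 1 M = LN (N + 1) M := (main_iff hM1).mpr hcond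
  have hmin : ∀ m : Nat, N + 1 ≤ m → m < M → LN 1 m ≠ LN (N + 1) m := by
    intro m hm hmM
    rw [Ne, main_iff hm]
    intro hc
    rcases bref_cases N N with h' | ⟨p, hp, hpN, h'⟩
    · omega
    · have := hc p hp hpN
      omega
  have hMle : M ≤ (N + 1) + (N + 1) := by
    rcases bref_cases N N with h' | ⟨p, hp, hpN, h'⟩
    · omega
    · have := cv_le_two_mul hp.two_le hpN
      omega
  have hA : solution n = (M : Int) := by
    rw [hN]
    show loopA ((((N : Nat) : Int)).toNat + 1) ((N : Int) + 1)
      (lcmSeq (PySem.List.pyRange 1 ((N : Int) + 1 + 1) 1)) ((N : Int) + 1) = (M : Int)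
    rw [show ((N : Int) + 1 + 1) = ((N + 1 : Nat) : Int) + 1 by push_cast; ring]
    rw [lcmSeq_cast (by omega)]
    rw [show ((N : Int) + 1) = ((N + 1 : Nat) : Int) by push_cast; ring]
    rw [show (((N : Nat) : Int)).toNat = N by simp]
    have hrun := loopA_eq hPM hmin (N + 1) (N + 1) (le_refl _) hM1 (by omega)
    rw [LN_self] at hrun
    exact hrun
  rw [hA, hB]
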